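-- pv_equiv track=rewrite | github.com/maidainhieu/chinese-chess-image-processing | main.py | fix_move
-- ===== SOURCE A (Python) =====
-- def fix_move(mang):
--     move=mang
--     mangmove=[move[0],move[1],move[2],move[3]]
--     for x in range(0,4):
--         name=mangmove[x]
--         if name=='a':
--             mangmove[x] = 'i'
--         if name=='b':
--             mangmove[x] = 'h'
--         if name=='c':
--             mangmove[x] = 'g'
--         if name=='d':
--             mangmove[x] = 'f'
--         if name=='i':
--             mangmove[x] = 'a'
--         if name=='h':
--             mangmove[x] = 'b'
--         if name=='g':
--             mangmove[x] = 'c'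
--         if name=='f':
--             mangmove[x] = 'd'
--         if name == '0':
--             mangmove[x] = '9'
--         if name == '9':
--              mangmove[x] = '0'
--         if name == '1':
--             mangmove[x] = '8'
--         if name == '8':
--             mangmove[x] = '1'
--         if name == '2':
--             mangmove[x] = '7'
--         if name == '7':
--             mangmove[x] = '2'
--         if name == '3':
--             mangmove[x] = '6'
--         if name == '6':
--             mangmove[x] = '3'
--         if name == '4':
--             mangmove[x] = '5'
--         if name == '5':
--             mangmove[x] = '4'
--     return mangmove
-- ===== SOURCE B (Python) =====
-- def fix_move(mang):
--     out = []
--     for i in range(4):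
--         s = mang[i]
--         if len(s) == 1:
--             c = s[0]
--             if '0' <= c <= '9':
--                 s = chr(ord('9') - (ord(c) - ord('0')))
--             elif 'a' <= c <= 'i':
--                 s = chr(ord('a') + 8 - (ord(c) - ord('a')))
--         out.append(s)
--     return out
-- ===== Notes on version B (the rewrite author's own statement) =====
-- stated objective: simpler
-- what changed: Replaced the 18-branch equality table by a closed-form arithmetic mirror: a single-character digit c becomes chr(ord('9')-(ord(c)-ord('0'))) and a letter in 'a'..'i' becomes chr(ord('a')+8-(ord(c)-ord('a'))), everything else is unchanged; the result list is built front-to-back instead of mutating a copy in place.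
import Mathlib
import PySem

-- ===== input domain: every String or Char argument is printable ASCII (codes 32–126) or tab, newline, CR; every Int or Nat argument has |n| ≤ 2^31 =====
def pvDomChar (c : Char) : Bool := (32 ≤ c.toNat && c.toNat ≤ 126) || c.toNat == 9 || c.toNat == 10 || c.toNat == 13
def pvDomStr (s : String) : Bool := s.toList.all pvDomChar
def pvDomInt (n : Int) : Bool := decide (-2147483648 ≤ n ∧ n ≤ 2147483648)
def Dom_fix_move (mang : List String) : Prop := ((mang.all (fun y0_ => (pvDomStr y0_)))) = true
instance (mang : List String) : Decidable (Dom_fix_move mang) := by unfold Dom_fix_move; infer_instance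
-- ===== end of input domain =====

-- B replaces A's 18-branch equality table by a closed-form arithmetic mirror of digits and of letters 'a'..'i' (objective: simpler).

-- ===== PORT A =====
-- the body of A's for-loop: 18 sequential ifs, each re-reading the (unchanged) `name`
def fixCellA (name : String) : String :=
  let r := name
  let r := if name = "a" then "i" else r
  let r := if name = "b" then "h" else r
  let r := if name = "c" then "g" else r
  let r := if name = "d" then "f" else r
  let r := if name = "i" then "a" else r
  let r := if name = "h" then "b" else r
  let r := if name = "g" then "c" else r
  let r := if name = "f" then "d" else r
  let r := if name = "0" then "9" else r
  let r := if name = "9" then "0" else r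
  let r := if name = "1" then "8" else r
  let r := if name = "8" then "1" else r
  let r := if name = "2" then "7" else r
  let r := if name = "7" then "2" else r
  let r := if name = "3" then "6" else r
  let r := if name = "6" then "3" else r
  let r := if name = "4" then "5" else r
  let r := if name = "5" then "4" else r
  r

def fix_move (mang : List String) : List String :=
  -- mangmove = [move[0], move[1], move[2], move[3]]; IndexError (pyGet? = none) is outside Pre_
  match PySem.List.pyGet? mang 0, PySem.List.pyGet? mang 1,
        PySem.List.pyGet? mang 2, PySem.List.pyGet? mang 3 with
  | some m0, some m1, some m2, some m3 =>
      (PySem.List.pyRange 0 4 1).foldl (fun mangmove x =>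
        match PySem.List.pyGet? mangmove x with
        | some name => mangmove.set x.toNat (fixCellA name)
        | none => mangmove) [m0, m1, m2, m3]
  | _, _, _, _ => []

-- ===== PORT B =====
-- the body of B's loop: closed-form mirror of a single character, others unchanged
def fixCellB (s : String) : String :=
  match s.toList with
  | [c] =>
      if '0' ≤ c ∧ c ≤ '9' then String.ofList [Char.ofNat ('9'.toNat - (c.toNat - '0'.toNat))]
      else if 'a' ≤ c ∧ c ≤ 'i' then String.ofList [Char.ofNat ('a'.toNat + 8 - (c.toNat - 'a'.toNat))]
      else s
  | _ => s

def fix_move_alt (mang : List String) : List String :=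
  (PySem.List.pyRange 0 4 1).foldl (fun out i =>
    match PySem.List.pyGet? mang i with
    | some s => out ++ [fixCellB s]
    | none => out) []

-- ===== PRECONDITION & SPEC =====
-- Pre_ excludes exactly the inputs with fewer than 4 elements, on which A (and B) raise IndexError.
def Pre_fix_move (mang : List String) : Prop := 4 ≤ mang.length
instance (mang : List String) : Decidable (Pre_fix_move mang) := by unfold Pre_fix_move; infer_instance
def pvWitness_fix_move : List String := ["a", "0", "e", "xy"]

def Spec_fix_move (mang : List String) (out : List String) : Prop := out = fix_move_alt mang
instance (mang : List String) (out : List String) : Decidable (Spec_fix_move mang out) := by unfold Spec_fix_move; infer_instance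

-- ===== CLAIM (what is proved, stated in full; the proofs are below) =====
def Claim_equal_fix_move : Prop := ∀ (mang : List String), Dom_fix_move mang → Pre_fix_move mang → Spec_fix_move mang (fix_move mang)

-- ===== LEMMAS AND PROOFS =====
theorem str_eq_iff (s t : String) : (s = t) ↔ s.toList = t.toList := by
  constructor
  · rintro rfl; rfl
  · intro h; rw [← String.ofList_toList (s := s), h, String.ofList_toList]

theorem cell_eq (s : String) (h : pvDomStr s = true) : fixCellA s = fixCellB s := by
  match hl : s.toList with
  | [] => simp [fixCellA, fixCellB, str_eq_iff, hl]
  | c1 :: c2 :: rest => simp [fixCellA, fixCellB, str_eq_iff, hl]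
  | [c] =>
    have hs : s = String.ofList [c] := by rw [← String.ofList_toList (s := s), hl]
    have h126 : c.toNat ≤ 126 := by
      rw [pvDomStr, hl] at h
      simp [pvDomChar] at h
      omega
    rw [hs]
    have hc : Char.ofNat c.toNat = c := Char.ofNat_toNat c
    rw [← hc]
    generalize c.toNat = n at h126
    interval_cases n <;> decide

-- ===== VERDICT (by name: the statement is the Claim_ definition above) =====
theorem fix_move_spec : Claim_equal_fix_move := by
  intro mang hdom hpre
  unfold Spec_fix_move
  match mang with
  | a :: b :: c :: d :: rest =>
    have hr : PySem.List.pyRange 0 4 1 = [0, 1, 2, 3] := by decide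
    have hda : pvDomStr a := by simp [Dom_fix_move] at hdom; tauto
    have hdb : pvDomStr b := by simp [Dom_fix_move] at hdom; tauto
    have hdc : pvDomStr c := by simp [Dom_fix_move] at hdom; tauto
    have hdd : pvDomStr d := by simp [Dom_fix_move] at hdom; tauto
    have g0 : PySem.List.pyGet? (a :: b :: c :: d :: rest) (0 : Int) = some a := by
      rw [PySem.List.pyGet?_of_nonneg (xs := a :: b :: c :: d :: rest) (i := 0) (by norm_num)]; simp
    have g1 : PySem.List.pyGet? (a :: b :: c :: d :: rest) (1 : Int) = some b := by
      rw [PySem.List.pyGet?_of_nonneg (xs := a :: b :: c :: d :: rest) (i := 1) (by norm_num)]; simp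
    have g2 : PySem.List.pyGet? (a :: b :: c :: d :: rest) (2 : Int) = some c := by
      rw [PySem.List.pyGet?_of_nonneg (xs := a :: b :: c :: d :: rest) (i := 2) (by norm_num)]; simp
    have g3 : PySem.List.pyGet? (a :: b :: c :: d :: rest) (3 : Int) = some d := by
      rw [PySem.List.pyGet?_of_nonneg (xs := a :: b :: c :: d :: rest) (i := 3) (by norm_num)]; simp
    simp only [fix_move, fix_move_alt, hr, g0, g1, g2, g3, List.foldl]
    simp [PySem.List.pyGet?, PySem.List.pyIdx?, List.set,
      cell_eq a hda, cell_eq b hdb, cell_eq c hdc, cell_eq d hdd]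
  | [] => exact absurd hpre (by simp [Pre_fix_move])
  | [_] => exact absurd hpre (by simp [Pre_fix_move])
  | [_, _] => exact absurd hpre (by simp [Pre_fix_move])
  | [_, _, _] => exact absurd hpre (by simp [Pre_fix_move])
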